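-- pv_equiv track=rewrite | github.com/Ersuniltoadster/resume-filter-chatbot | app/api/routes/chat.py | _looks_like_jd
-- ===== SOURCE A (Python) =====
-- def _looks_like_jd(text: str) -> bool:
--     t = (text or "").strip().lower()
--     if len(t) >= 400:
--         return True
--     jd_keywords = [
--         "job title", "responsibilities", "requirements", "qualifications",
--         "must have", "nice to have", "we are looking", "role:", "experience with"
--     ]
--     return any(k in t for k in jd_keywords)
-- ===== SOURCE B (Python) =====
-- _JD_KEYWORDS = [
--     "job title", "responsibilities", "requirements", "qualifications",
--     "must have", "nice to have", "we are looking", "role:", "experience with"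
-- ]
--
-- def _looks_like_jd(text: str) -> bool:
--     t = (text or "").strip().lower()
--     if len(t) >= 400:
--         return True
--     # single left-to-right pass: at each position, check whether any keyword starts there
--     return any(t.startswith(k, i) for i in range(len(t)) for k in _JD_KEYWORDS)
-- ===== Notes on version B (the rewrite author's own statement) =====
-- stated objective: alternative
-- what changed: Replaces nine independent whole-text substring scans (one per keyword) with a single left-to-right position scan that checks at each index whether any keyword starts there, via startswith with an offset.
import Mathlib
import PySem

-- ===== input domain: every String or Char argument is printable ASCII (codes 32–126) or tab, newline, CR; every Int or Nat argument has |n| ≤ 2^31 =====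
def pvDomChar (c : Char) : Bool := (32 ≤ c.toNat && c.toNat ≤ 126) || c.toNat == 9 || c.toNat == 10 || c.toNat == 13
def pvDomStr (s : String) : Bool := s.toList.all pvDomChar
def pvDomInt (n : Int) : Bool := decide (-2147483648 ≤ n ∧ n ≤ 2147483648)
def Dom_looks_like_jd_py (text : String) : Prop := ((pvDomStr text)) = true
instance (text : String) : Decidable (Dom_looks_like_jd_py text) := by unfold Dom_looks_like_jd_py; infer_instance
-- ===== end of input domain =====

-- B replaces the nine independent substring scans with a single left-to-right position
-- scan checking at each index whether any keyword starts there (alternative decomposition).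


-- ===== PORT A =====
-- 'text or ""' is the identity on strings (the empty string is already ""), so it is dropped.
def looks_like_jd_py (text : String) : Bool :=
  let t := PySem.Str.lower (PySem.Str.strip text)
  if 400 ≤ PySem.Str.len t then true
  else
    (["job title", "responsibilities", "requirements", "qualifications",
      "must have", "nice to have", "we are looking", "role:", "experience with"] : List String).any
      (fun k => PySem.Str.isIn k t)

-- ===== PORT B =====
def jdKeywordsAlt : List String :=
  ["job title", "responsibilities", "requirements", "qualifications",
   "must have", "nice to have", "we are looking", "role:", "experience with"]

-- t.startswith(k, i) with 0 ≤ i ≤ len(t) is exactly 'k is a prefix of t[i:]' (Chars.startswith on drop).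
def looks_like_jd_py_alt (text : String) : Bool :=
  let t := PySem.Str.lower (PySem.Str.strip text)
  if 400 ≤ PySem.Str.len t then true
  else
    (PySem.List.pyRange 0 (PySem.Str.len t) 1).any (fun i =>
      jdKeywordsAlt.any (fun k => PySem.Chars.startswith (t.toList.drop i.toNat) k.toList))

-- ===== PRECONDITION & SPEC =====
def Spec_looks_like_jd_py (text : String) (out : Bool) : Prop := out = looks_like_jd_py_alt text
instance (text : String) (out : Bool) : Decidable (Spec_looks_like_jd_py text out) := by unfold Spec_looks_like_jd_py; infer_instance

-- ===== CLAIM (what is proved, stated in full; the proofs are below) =====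
def Claim_equal_looks_like_jd_py : Prop := ∀ (text : String), Dom_looks_like_jd_py text → Spec_looks_like_jd_py text (looks_like_jd_py text)

-- ===== LEMMAS AND PROOFS =====

-- keyword-list membership gives a nonempty character list
theorem jd_keyword_ne_nil (k : String) (hk : k ∈ jdKeywordsAlt) : k.toList ≠ [] := by
  unfold jdKeywordsAlt at hk
  simp only [List.mem_cons, List.not_mem_nil, or_false] at hk
  rcases hk with rfl|rfl|rfl|rfl|rfl|rfl|rfl|rfl|rfl <;> decide

theorem looks_like_jd_key (s : List Char) :
    jdKeywordsAlt.any (fun k => PySem.Chars.isIn k.toList s) =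
    (PySem.List.pyRange 0 (s.length : Int) 1).any (fun i =>
      jdKeywordsAlt.any (fun k => PySem.Chars.startswith (s.drop i.toNat) k.toList)) := by
  rw [Bool.eq_iff_iff]
  simp only [List.any_eq_true, PySem.Chars.startswith_iff, PySem.List.mem_pyRange_one]
  constructor
  · rintro ⟨k, hk, hin⟩
    obtain ⟨j, hj⟩ := (PySem.Chars.exists_prefix_drop_iff_isIn _ _).mpr hin
    have hjlt : j < s.length := by
      by_contra h
      rw [List.drop_eq_nil_of_le (Nat.le_of_not_lt fun h2 => h h2)] at hj
      exact jd_keyword_ne_nil k hk (List.prefix_nil.mp hj)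
    exact ⟨(j : Int), ⟨by omega, by exact_mod_cast hjlt⟩, k, hk, by simpa using hj⟩
  · rintro ⟨i, ⟨h0, hlt⟩, k, hk, hpre⟩
    exact ⟨k, hk, (PySem.Chars.isIn_iff_infix _ _).mpr (List.infix_iff_prefix_suffix.mpr ⟨_, hpre, List.drop_suffix _ _⟩)⟩

-- ===== VERDICT (by name: the statement is the Claim_ definition above) =====
theorem looks_like_jd_py_spec : Claim_equal_looks_like_jd_py := by
  intro text _
  unfold Spec_looks_like_jd_py looks_like_jd_py looks_like_jd_py_alt
  dsimp only
  split
  · rfl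
  · have := looks_like_jd_key (PySem.Str.lower (PySem.Str.strip text)).toList
    simpa [PySem.Str.isIn_eq, PySem.Str.len_eq, PySem.Chars.isIn_iff_infix, jdKeywordsAlt] using this
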